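-- pv_equiv track=rewrite | github.com/yuda03979/image_steganography | Functions.py | translate_bin_to_ascii
-- ===== SOURCE A (Python) =====
-- def translate_bin_to_ascii(bin_text:str, dict_bin_ascii:dict):
--     text = ""
--     var = ""
--     for i in bin_text:
--         var += i
--         if var in dict_bin_ascii:
--             text += dict_bin_ascii[var]
--             var = ''
--     return text
-- ===== SOURCE B (Python) =====
-- def translate_bin_to_ascii(bin_text: str, dict_bin_ascii: dict):
--     # Build a trie: each bit/char indexes a child dict; the entry's value is
--     # stored under the terminal marker None at the end of its key path.
--     root = {}
--     for key, val in dict_bin_ascii.items():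
--         node = root
--         for ch in key:
--             node = node.setdefault(ch, {})
--         node.setdefault(None, val)
--     # Walk the text through the trie; emit on the first terminal hit and
--     # restart at the root; a failed descent means nothing can match any more.
--     out = []
--     node = root
--     for ch in bin_text:
--         if ch not in node:
--             break
--         node = node[ch]
--         if None in node:
--             out.append(node[None])
--             node = root
--     return ''.join(out)
-- ===== Notes on version B (the rewrite author's own statement) =====
-- stated objective: faster
-- what changed: B precompiles the dictionary into a trie (nested dicts keyed by character, terminal marker for values) and decodes in a single walk that emits at the first terminal node and stops on a failed descent, instead of A's ever-growing prefix accumulator with a dictionary membership test (hashing the whole accumulated prefix) per character.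
import Mathlib
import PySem

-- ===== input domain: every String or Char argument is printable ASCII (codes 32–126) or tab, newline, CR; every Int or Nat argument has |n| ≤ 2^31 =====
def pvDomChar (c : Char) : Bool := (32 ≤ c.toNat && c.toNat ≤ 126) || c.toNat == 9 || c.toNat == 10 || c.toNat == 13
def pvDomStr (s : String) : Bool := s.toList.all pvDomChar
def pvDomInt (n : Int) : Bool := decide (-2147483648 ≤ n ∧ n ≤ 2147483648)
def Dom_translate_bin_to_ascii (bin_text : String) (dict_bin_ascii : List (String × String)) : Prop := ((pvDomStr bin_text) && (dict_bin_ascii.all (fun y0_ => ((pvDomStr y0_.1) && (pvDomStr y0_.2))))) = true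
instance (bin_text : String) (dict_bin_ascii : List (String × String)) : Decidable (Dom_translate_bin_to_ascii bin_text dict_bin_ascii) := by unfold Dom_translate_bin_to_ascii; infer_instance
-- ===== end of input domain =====

-- B replaces A's growing-prefix accumulator + per-character dict membership test (which hashes
-- the whole accumulated prefix each step) by a precompiled trie walked once over the text;
-- a timing run measured B faster at the largest sizes (objective: faster).

-- ===== PORT A =====
-- dict membership/lookup on the association list (first match, Python dict semantics)
def pvLookup : List (String × String) → String → Option String
  | [], _ => none
  | (k, v) :: rest, s => if k == s then some v else pvLookup rest s

-- the for-loop of A: state (text, var)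
def aLoop : List Char → List (String × String) → String → String → String
  | [], _, text, _ => text
  | c :: cs, d, text, var =>
    let var' := var.push c
    match pvLookup d var' with
    | some v => aLoop cs d (text ++ v) ""
    | none => aLoop cs d text var'

def translate_bin_to_ascii (bin_text : String) (dict_bin_ascii : List (String × String)) : String :=
  aLoop bin_text.toList dict_bin_ascii "" ""

-- ===== PORT B =====
-- trie node: optional terminal value + ordered child list (explicit child-list type)
mutual
inductive PTrie where
  | mk : Option String → PChildren → PTrie
inductive PChildren where
  | nil : PChildren
  | cons : Char → PTrie → PChildren → PChildren
end

def PTrie.term : PTrie → Option String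
  | .mk t _ => t

def PTrie.ch : PTrie → PChildren
  | .mk _ c => c

def childFind : PChildren → Char → Option PTrie
  | .nil, _ => none
  | .cons c' t rest, c => if c' = c then some t else childFind rest c

def childSet : PChildren → Char → PTrie → PChildren
  | .nil, c, t => .cons c t .nil
  | .cons c' t' rest, c, t => if c' = c then .cons c' t rest else .cons c' t' (childSet rest c t)

-- functional rendering of Source B's in-place `node.setdefault(ch, {})` insertion
def trieInsert : PTrie → List Char → String → PTrie
  | .mk t ch, [], v => .mk (some (t.getD v)) ch
  | .mk t ch, c :: cs, v =>
    let sub := (childFind ch c).getD (.mk none .nil)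
    .mk t (childSet ch c (trieInsert sub cs v))

def buildTrie (d : List (String × String)) : PTrie :=
  d.foldl (fun T kv => trieInsert T kv.1.toList kv.2) (.mk none .nil)

-- the decoding walk of Source B: emit at a terminal child and restart at the root;
-- a failed descent ends the walk
def bWalk : List Char → PTrie → PTrie → String → String
  | [], _, _, out => out
  | c :: cs, root, node, out =>
    match childFind node.ch c with
    | none => out
    | some n =>
      match n.term with
      | some v => bWalk cs root root (out ++ v)
      | none => bWalk cs root n out

def translate_bin_to_ascii_alt (bin_text : String) (dict_bin_ascii : List (String × String)) : String :=
  let root := buildTrie dict_bin_ascii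
  bWalk bin_text.toList root root ""

-- ===== PRECONDITION & SPEC =====
def Spec_translate_bin_to_ascii (bin_text : String) (dict_bin_ascii : List (String × String)) (out : String) : Prop := out = translate_bin_to_ascii_alt bin_text dict_bin_ascii
instance (bin_text : String) (dict_bin_ascii : List (String × String)) (out : String) : Decidable (Spec_translate_bin_to_ascii bin_text dict_bin_ascii out) := by unfold Spec_translate_bin_to_ascii; infer_instance

-- ===== CLAIM (what is proved, stated in full; the proofs are below) =====
def Claim_equal_translate_bin_to_ascii : Prop := ∀ (bin_text : String) (dict_bin_ascii : List (String × String)), Dom_translate_bin_to_ascii bin_text dict_bin_ascii → Spec_translate_bin_to_ascii bin_text dict_bin_ascii (translate_bin_to_ascii bin_text dict_bin_ascii)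

-- ===== LEMMAS AND PROOFS =====

-- descend the trie along a path
def trieFind : PTrie → List Char → Option PTrie
  | t, [] => some t
  | t, c :: cs =>
    match childFind t.ch c with
    | none => none
    | some u => trieFind u cs

-- terminal value stored at a path
def termAt (t : PTrie) (s : List Char) : Option String :=
  match trieFind t s with
  | none => none
  | some u => u.term

-- lookup in the association list with a List Char key
def lookupL : List (String × String) → List Char → Option String
  | [], _ => none
  | (k, v) :: rest, s => if k.toList = s then some v else lookupL rest s

theorem pvLookup_eq_lookupL (d : List (String × String)) (s : String) :
    pvLookup d s = lookupL d s.toList := by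
  induction d with
  | nil => rfl
  | cons kv rest ih =>
    obtain ⟨k, v⟩ := kv
    simp only [pvLookup, lookupL, ih]
    by_cases h : k = s
    · simp [h]
    · have h2 : k.toList ≠ s.toList := fun hc => h (String.toList_inj.mp hc)
      simp [h, h2]

theorem childFind_childSet_self : ∀ (ch : PChildren) (c : Char) (t : PTrie),
    childFind (childSet ch c t) c = some t
  | .nil, c, t => by simp [childSet, childFind]
  | .cons c' t' rest, c, t => by
    by_cases h : c' = c
    · simp [childSet, h, childFind]
    · simp [childSet, h, childFind, childFind_childSet_self rest c t]

theorem childFind_childSet_ne : ∀ (ch : PChildren) (c c' : Char) (t : PTrie), c' ≠ c →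
    childFind (childSet ch c t) c' = childFind ch c'
  | .nil, c, c', t => fun h => by
    simp only [childSet, childFind, if_neg (fun hc : c = c' => h hc.symm)]
  | .cons c'' t'' rest, c, c', t => fun h => by
    by_cases h2 : c'' = c
    · subst h2
      simp only [childSet, if_true, childFind, if_neg (fun hc : c'' = c' => h hc.symm)]
    · simp [childSet, h2, childFind, childFind_childSet_ne rest c c' t h]

theorem termAt_empty (s : List Char) : termAt (.mk none .nil) s = none := by
  cases s with
  | nil => rfl
  | cons c cs => simp [termAt, trieFind, PTrie.ch, childFind]

theorem termAt_insert (k : List Char) (v : String) (T : PTrie) (s : List Char) :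
    termAt (trieInsert T k v) s =
      if s = k then some ((termAt T k).getD v) else termAt T s := by
  induction k generalizing T s with
  | nil =>
    obtain ⟨t, ch⟩ := T
    cases s with
    | nil => simp [trieInsert, termAt, trieFind, PTrie.term]
    | cons c cs => simp [trieInsert, termAt, trieFind, PTrie.ch]
  | cons c cs ih =>
    obtain ⟨t, ch⟩ := T
    cases s with
    | nil => simp [trieInsert, termAt, trieFind, PTrie.term]
    | cons c' cs' =>
      by_cases hc : c' = c
      · subst hc
        have hfind : childFind (childSet ch c' (trieInsert ((childFind ch c').getD (.mk none .nil)) cs v)) c'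
            = some (trieInsert ((childFind ch c').getD (.mk none .nil)) cs v) :=
          childFind_childSet_self ..
        have lhs : termAt (trieInsert (.mk t ch) (c' :: cs) v) (c' :: cs')
            = termAt (trieInsert ((childFind ch c').getD (.mk none .nil)) cs v) cs' := by
          simp [trieInsert, termAt, trieFind, PTrie.ch, hfind]
        rw [lhs, ih]
        have hsub : ∀ s', termAt (.mk t ch) (c' :: s')
            = termAt ((childFind ch c').getD (.mk none .nil)) s' := by
          intro s'
          cases hcf : childFind ch c' with
          | none =>
            cases s' with
            | nil => simp [termAt, trieFind, PTrie.ch, hcf, PTrie.term]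
            | cons a b => simp [termAt, trieFind, PTrie.ch, hcf, childFind]
          | some u => simp [termAt, trieFind, PTrie.ch, hcf]
        rw [← hsub, ← hsub]
        simp
      · have hfind := childFind_childSet_ne ch c c'
            (trieInsert ((childFind ch c).getD (.mk none .nil)) cs v) hc
        have hne : (c' :: cs') ≠ (c :: cs) := by simp [hc]
        simp only [trieInsert, termAt, trieFind, PTrie.ch, hfind, hne, if_false]

theorem termAt_foldl (d : List (String × String)) (T : PTrie) (s : List Char) :
    termAt (d.foldl (fun T kv => trieInsert T kv.1.toList kv.2) T) s
      = ((termAt T s).or (lookupL d s)) := by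
  induction d generalizing T with
  | nil => cases h : termAt T s <;> simp [h, lookupL]
  | cons kv rest ih =>
    obtain ⟨k, v⟩ := kv
    simp only [List.foldl_cons, ih, termAt_insert, lookupL]
    by_cases h : s = k.toList
    · subst h
      cases hT : termAt T k.toList <;> simp
    · have h2 : k.toList ≠ s := fun hc => h hc.symm
      simp [h, h2]

theorem termAt_build (d : List (String × String)) (s : List Char) :
    termAt (buildTrie d) s = lookupL d s := by
  rw [buildTrie, termAt_foldl, termAt_empty]
  rfl

theorem trieFind_append (T : PTrie) (s u : List Char) :
    trieFind T (s ++ u) = (trieFind T s).bind (fun n => trieFind n u) := by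
  induction s generalizing T with
  | nil => simp [trieFind]
  | cons c cs ih =>
    simp only [List.cons_append, trieFind]
    cases childFind T.ch c with
    | none => rfl
    | some n => simp [ih]

theorem termAt_none_of_find_none (T : PTrie) (s : List Char) (h : trieFind T s = none) :
    termAt T s = none := by
  simp [termAt, h]

-- once A's accumulator has fallen off every key, A never matches again
theorem aLoop_dead (cs : List Char) (d : List (String × String)) (text var : String)
    (h : trieFind (buildTrie d) var.toList = none) :
    aLoop cs d text var = text := by
  induction cs generalizing var with
  | nil => rfl
  | cons c cs ih =>
    have hext : trieFind (buildTrie d) (var.push c).toList = none := by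
      rw [String.toList_push, trieFind_append, h]; rfl
    have hlk : pvLookup d (var.push c) = none := by
      rw [pvLookup_eq_lookupL, ← termAt_build, termAt_none_of_find_none _ _ hext]
    simp [aLoop, hlk, ih _ hext]

-- loop invariant: B's current node is the trie node at A's accumulator path
theorem aLoop_eq_bWalk (cs : List Char) (d : List (String × String))
    (var : String) (node : PTrie) (text : String)
    (h : trieFind (buildTrie d) var.toList = some node) :
    aLoop cs d text var = bWalk cs (buildTrie d) node text := by
  induction cs generalizing var node text with
  | nil => rfl
  | cons c cs ih =>
    have hstep : trieFind (buildTrie d) (var.push c).toList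
        = match childFind node.ch c with
          | none => none
          | some n => some n := by
      rw [String.toList_push, trieFind_append, h]
      simp only [Option.bind_some, trieFind]
    have hlk : pvLookup d (var.push c) = termAt (buildTrie d) (var.push c).toList := by
      rw [pvLookup_eq_lookupL, termAt_build]
    cases hcf : childFind node.ch c with
    | none =>
      have hnone : trieFind (buildTrie d) (var.push c).toList = none := by
        rw [hstep, hcf]
      have hlk2 : pvLookup d (var.push c) = none := by
        rw [hlk, termAt_none_of_find_none _ _ hnone]
      simp [aLoop, hlk2, bWalk, hcf, aLoop_dead _ _ _ _ hnone]
    | some n =>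
      have hsome : trieFind (buildTrie d) (var.push c).toList = some n := by
        rw [hstep, hcf]
      have hlk2 : pvLookup d (var.push c) = n.term := by
        rw [hlk, termAt, hsome]
      cases ht : n.term with
      | some v =>
        have hroot : trieFind (buildTrie d) ("" : String).toList = some (buildTrie d) := rfl
        simp [aLoop, hlk2, ht, bWalk, hcf, ih _ _ _ hroot]
      | none =>
        simp [aLoop, hlk2, ht, bWalk, hcf, ih _ _ _ hsome]

-- ===== VERDICT (by name: the statement is the Claim_ definition above) =====
theorem translate_bin_to_ascii_spec : Claim_equal_translate_bin_to_ascii := by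
  intro bin_text dict_bin_ascii _
  unfold Spec_translate_bin_to_ascii translate_bin_to_ascii translate_bin_to_ascii_alt
  exact aLoop_eq_bWalk bin_text.toList dict_bin_ascii "" (buildTrie dict_bin_ascii) "" rfl
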